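-- pv_equiv track=rewrite | github.com/quarkslab/tritondse | tritondse/abi.py | find_string_format
-- ===== SOURCE A (Python) =====
-- def find_string_format(s):
--     pos = 0
--     postString = list()
--     frmtString = [i for i, letter in enumerate(s) if letter == '%']
--
--     for i in frmtString:
--         if s[i+1] == 's':
--             postString.append(pos)
--         pos += 1
--
--     return postString
-- ===== SOURCE B (Python) =====
-- def find_string_format(s):
--     # argument slot k corresponds to the text after the k-th '%'; it is a %s
--     # specifier exactly when that piece starts with 's'
--     return [k for k, part in enumerate(s.split('%')[1:]) if part.startswith('s')]
-- ===== Notes on version B (the rewrite author's own statement) =====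
-- stated objective: simpler
-- what changed: B discards A's '%'-index list and running counter entirely: it splits the string on '%' and returns the positions (in the split list) of the pieces after the first that start with 's' (slot k is exactly the text after the k-th '%'); the scan runs in C via str.split instead of A's Python-level loop.
-- crash fix: On strings ending in '%' A raises IndexError at s[i+1]; B returns the indices of the earlier %s specifiers (e.g. [0] on '%s b%'). — e.g. on find_string_format("%s b%"): A raises IndexError, B returns [0]
import Mathlib
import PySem

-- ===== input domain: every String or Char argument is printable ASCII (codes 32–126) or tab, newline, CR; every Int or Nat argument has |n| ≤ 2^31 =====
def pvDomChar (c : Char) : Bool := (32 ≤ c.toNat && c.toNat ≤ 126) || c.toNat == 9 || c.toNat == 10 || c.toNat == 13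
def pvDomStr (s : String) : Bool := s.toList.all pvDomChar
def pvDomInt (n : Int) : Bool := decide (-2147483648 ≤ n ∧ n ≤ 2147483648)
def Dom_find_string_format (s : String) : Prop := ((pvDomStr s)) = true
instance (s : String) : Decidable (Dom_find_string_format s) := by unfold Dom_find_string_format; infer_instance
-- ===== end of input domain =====

-- B replaces A's '%'-index list + counting loop by s.split('%'): slot k is the text after the
-- k-th '%', a %s specifier iff that piece starts with 's' (objective: simpler).

-- ===== PORT A =====
-- A: build frmtString = indices of '%', then fold over it with counter pos, appending pos when s[i+1]=='s'.
def find_string_format (s : String) : List Int :=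
  let frmtString : List Int :=
    ((PySem.List.enumerate s.toList).filter (fun p => p.2 = '%')).map (·.1)
  let res := frmtString.foldl
    (fun (st : Int × List Int) i =>
      let post := if PySem.List.pyGet? s.toList (i + 1) = some 's' then st.2 ++ [st.1] else st.2
      (st.1 + 1, post))
    (0, [])
  res.2

-- ===== PORT B =====
-- B: split on '%', enumerate the pieces after the first, keep indices of pieces starting with 's'.
def find_string_format_alt (s : String) : List Int :=
  let parts := PySem.Chars.splitOn s.toList "%".toList
  ((PySem.List.enumerate (parts.drop 1)).filter
      (fun p => PySem.Chars.startswith p.2 "s".toList)).map (·.1)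

-- ===== PRECONDITION & SPEC =====
-- Pre_ excludes exactly the strings ending in '%', on which the Python A raises IndexError at s[i+1].
def Pre_find_string_format (s : String) : Prop := s.toList.getLast? ≠ some '%'
instance (s : String) : Decidable (Pre_find_string_format s) := by unfold Pre_find_string_format; infer_instance
def pvWitness_find_string_format : String := "a%sb%%d"

-- On strings ending in '%' A raises IndexError (s[i+1] past the end); B returns the indices of the
-- earlier %s specifiers (the trailing '%' is no specifier).
def Raises_find_string_format (s : String) : Prop := s.toList.getLast? = some '%'
instance (s : String) : Decidable (Raises_find_string_format s) := by unfold Raises_find_string_format; infer_instance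
def pvRaiseWitness_find_string_format : String := "%s b%"
def pvRaiseWitnessOut_find_string_format : List Int := [0]

def Spec_find_string_format (s : String) (out : List Int) : Prop := out = find_string_format_alt s
instance (s : String) (out : List Int) : Decidable (Spec_find_string_format s out) := by unfold Spec_find_string_format; infer_instance

-- ===== CLAIM (what is proved, stated in full; the proofs are below) =====
def Claim_equal_find_string_format : Prop := ∀ (s : String), Dom_find_string_format s → Pre_find_string_format s → Spec_find_string_format s (find_string_format s)
def Claim_raises_find_string_format : Prop := (∀ (s : String), Dom_find_string_format s → Raises_find_string_format s → ¬ Pre_find_string_format s) ∧ (Dom_find_string_format (pvRaiseWitness_find_string_format) ∧ Raises_find_string_format (pvRaiseWitness_find_string_format) ∧ find_string_format_alt (pvRaiseWitness_find_string_format) = pvRaiseWitnessOut_find_string_format)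

-- ===== LEMMAS AND PROOFS =====

-- the common specification: spec cs k = indices (counted from k) of '%' followed by 's'
def pvSpec : List Char → Int → List Int
  | [], _ => []
  | c :: rest, k =>
      if c = '%' then (if rest.head? = some 's' then [k] else []) ++ pvSpec rest (k + 1)
      else pvSpec rest k

-- single-character split, head-cons style
def pvSplitc : List Char → List (List Char)
  | [] => [[]]
  | c :: rest =>
      if c = '%' then [] :: pvSplitc rest
      else match pvSplitc rest with
        | [] => [[c]]
        | h :: t => (c :: h) :: t

theorem pvSplitc_ne_nil (cs : List Char) : pvSplitc cs ≠ [] := by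
  cases cs with
  | nil => simp [pvSplitc]
  | cons c rest =>
    simp only [pvSplitc]
    split_ifs with h
    · simp
    · cases hr : pvSplitc rest <;> simp

-- folding over a filtered list = folding over the whole list with an if-guard
theorem pv_foldl_filter_if {α β : Type} (p : α → Bool) (f : β → α → β) (l : List α) (init : β) :
    (l.filter p).foldl f init = l.foldl (fun st x => if p x then f st x else st) init := by
  induction l generalizing init with
  | nil => rfl
  | cons a t ih =>
    by_cases h : p a = true
    · simp [h, ih]
    · simp [h, ih]

-- the go-loop of PySem.Chars.splitOn with separator "%" computes pvSplitc
theorem pvSplitc_pct (rest : List Char) : pvSplitc ('%' :: rest) = [] :: pvSplitc rest := by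
  simp [pvSplitc]

theorem pvSplitc_other (c : Char) (rest hh : List Char) (tt : List (List Char))
    (hc : c ≠ '%') (h : pvSplitc rest = hh :: tt) :
    pvSplitc (c :: rest) = (c :: hh) :: tt := by
  simp [pvSplitc, hc, h]

theorem pv_startswith_s (c : Char) (l : List Char) :
    PySem.Chars.startswith (c :: l) ['s'] = (c == 's') := by
  rw [Bool.eq_iff_iff, PySem.Chars.startswith_iff, List.cons_prefix_cons]
  constructor
  · rintro ⟨h, -⟩; exact beq_iff_eq.mpr h.symm
  · intro h; exact ⟨(beq_iff_eq.mp h).symm, List.nil_prefix⟩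

theorem pv_go_splitc (fuel : Nat) (l cur : List Char) (acc : List (List Char))
    (hf : l.length ≤ fuel) :
    PySem.Chars.splitOn.go ['%'] fuel l cur acc =
      acc.reverse ++ (match pvSplitc l with
        | [] => [cur.reverse]
        | h :: t => (cur.reverse ++ h) :: t) := by
  induction fuel generalizing l cur acc with
  | zero =>
    interval_cases hl : l.length
    · simp at hl; subst hl; simp [PySem.Chars.splitOn.go, pvSplitc]
  | succ fuel ih =>
    cases l with
    | nil => simp [PySem.Chars.splitOn.go, pvSplitc]
    | cons c rest =>
      simp only [PySem.Chars.splitOn.go]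
      have hlen : rest.length ≤ fuel := by simpa using hf
      by_cases hc : c = '%'
      · subst hc
        rw [if_pos (by simp [List.isPrefixOf])]
        simp only [List.length_cons, List.length_nil, List.drop_succ_cons, List.drop_zero]
        rw [ih rest [] (cur.reverse :: acc) hlen, pvSplitc_pct]
        cases h : pvSplitc rest with
        | nil => exact absurd h (pvSplitc_ne_nil rest)
        | cons a t => simp
      · rw [if_neg (by simp [List.isPrefixOf]; intro h; exact absurd h.symm hc)]
        rw [ih rest (c :: cur) acc hlen]
        cases h : pvSplitc rest with
        | nil => exact absurd h (pvSplitc_ne_nil rest)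
        | cons a t => rw [pvSplitc_other c rest a t hc h]; simp

theorem pv_splitOn_eq (cs : List Char) :
    PySem.Chars.splitOn cs ['%'] = pvSplitc cs := by
  unfold PySem.Chars.splitOn
  rw [pv_go_splitc cs.length.succ cs [] [] (Nat.le_succ _)]
  cases h : pvSplitc cs with
  | nil => exact absurd h (pvSplitc_ne_nil cs)
  | cons a t => simp

-- the head piece of pvSplitc starts with 's' iff the first character is 's'
theorem pv_head_splitc (cs : List Char) :
    PySem.Chars.startswith (pvSplitc cs).headI ['s'] = (cs.head? == some 's') := by
  cases cs with
  | nil => simp [pvSplitc, PySem.Chars.startswith]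
  | cons c rest =>
    by_cases hc : c = '%'
    · subst hc; rw [pvSplitc_pct]; simp [PySem.Chars.startswith]
    · cases h : pvSplitc rest with
      | nil => exact absurd h (pvSplitc_ne_nil rest)
      | cons hh tt =>
        rw [pvSplitc_other c rest hh tt hc h]
        simp only [List.headI, List.head?_cons, pv_startswith_s]
        by_cases hcs : c = 's' <;> simp [hcs]

-- B-side characterization: the filtered enumeration of the split tail is pvSpec
theorem pv_B_spec (cs : List Char) (k : Int) :
    (((PySem.List.enumerate ((pvSplitc cs).drop 1) k).filter
        (fun p => PySem.Chars.startswith p.2 ['s'])).map (·.1)) = pvSpec cs k := by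
  induction cs generalizing k with
  | nil => simp [pvSplitc, pvSpec]
  | cons c rest ih =>
    by_cases hc : c = '%'
    · subst hc
      rw [pvSplitc_pct]
      simp only [List.drop_succ_cons, List.drop_zero]
      cases h : pvSplitc rest with
      | nil => exact absurd h (pvSplitc_ne_nil rest)
      | cons hh tt =>
        rw [PySem.List.enumerate_cons]
        have hhead : PySem.Chars.startswith hh ['s'] = (rest.head? == some 's') := by
          have := pv_head_splitc rest; rw [h] at this; simpa using this
        have hdrop : ((pvSplitc rest).drop 1) = tt := by rw [h]; rfl
        simp only [pvSpec, List.filter_cons, hhead]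
        by_cases hs : rest.head? = some 's'
        · simp only [hs, beq_self_eq_true, if_true, List.map_cons]
          have := ih (k + 1); rw [List.drop_one] at this
          rw [show tt = (pvSplitc rest).tail from by rw [h]; rfl]; simpa using this
        · have hb : (rest.head? == some 's') = false := by simp [hs]
          simp only [hb, Bool.false_eq_true, if_false]
          have := ih (k + 1); rw [List.drop_one] at this
          rw [show tt = (pvSplitc rest).tail from by rw [h]; rfl]; simpa [hs] using this
    · cases h : pvSplitc rest with
      | nil => exact absurd h (pvSplitc_ne_nil rest)
      | cons hh tt =>
        rw [pvSplitc_other c rest hh tt hc h]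
        have hdrop : ((pvSplitc rest).drop 1) = tt := by rw [h]; rfl
        simp only [List.drop_succ_cons, List.drop_zero, ← hdrop, ih]
        simp [pvSpec, hc]

-- A-side characterization: the guarded fold over enumerate computes pvSpec
theorem pv_A_fold (t : List Char) (d : List Char) (n : Nat) (hd : t.drop n = d)
    (k : Int) (acc : List Int) :
    ((PySem.List.enumerate d (n : Int)).foldl
      (fun (st : Int × List Int) p =>
        if p.2 = '%' then
          (st.1 + 1, if PySem.List.pyGet? t (p.1 + 1) = some 's' then st.2 ++ [st.1] else st.2)
        else st)
      (k, acc)).2 = acc ++ pvSpec d k := by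
  induction d generalizing n k acc with
  | nil => simp [PySem.List.enumerate, pvSpec]
  | cons c rest ih =>
    rw [PySem.List.enumerate_cons]
    have hrest : t.drop (n + 1) = rest := by
      rw [← List.tail_drop, hd]; rfl
    have hget : PySem.List.pyGet? t ((n + 1 : Nat) : Int) = rest.head? := by
      rw [PySem.List.pyGet?_natCast, ← List.head?_drop, hrest]
    simp only [List.foldl_cons]
    have hc1 : ((n : Int) + 1) = ((n + 1 : Nat) : Int) := by push_cast; ring
    by_cases hc : c = '%'
    · simp only [hc, hc1, hget, if_true]
      by_cases hs : rest.head? = some 's'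
      · rw [if_pos hs, ih (n + 1) hrest (k + 1) (acc ++ [k])]
        simp [pvSpec, hs]
      · rw [if_neg hs, ih (n + 1) hrest (k + 1) acc]
        simp [pvSpec, hs]
    · rw [if_neg (by simpa using hc), hc1, ih (n + 1) hrest k acc]
      simp [pvSpec, hc]

theorem find_string_format_eq_spec (s : String) :
    find_string_format s = pvSpec s.toList 0 := by
  unfold find_string_format
  simp only [List.foldl_map, pv_foldl_filter_if, decide_eq_true_eq]
  have h := pv_A_fold s.toList s.toList 0 (by simp) 0 []
  simp only [Nat.cast_zero, List.nil_append] at h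
  exact h

theorem find_string_format_alt_eq_spec (s : String) :
    find_string_format_alt s = pvSpec s.toList 0 := by
  unfold find_string_format_alt
  have h1 : "%".toList = ['%'] := rfl
  have h2 : "s".toList = ['s'] := rfl
  rw [h1, h2, pv_splitOn_eq]
  simpa using pv_B_spec s.toList 0

-- ===== VERDICT (by name: the statement is the Claim_ definition above) =====
theorem find_string_format_spec : Claim_equal_find_string_format := by
  intro s _ _
  unfold Spec_find_string_format
  rw [find_string_format_eq_spec, find_string_format_alt_eq_spec]

@[simp] theorem find_string_format_raises : Claim_raises_find_string_format := by
  unfold Claim_raises_find_string_format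
  exact ⟨by intro s _ h hp; exact hp h, by decide⟩
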